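-- pv_equiv track=rewrite | github.com/gr1bby/pyLabs | week1/cat_and_dog.py | calculate
-- ===== SOURCE A (Python) =====
-- def calculate(years: int) -> list:
--     list_of_ages = [years]
--     catYears, dogYears = 0, 0
--
--     for year in range(years):
--         if year == 0:
--             catYears += 15
--             dogYears += 15
--
--         elif year == 1:
--             catYears += 9
--             dogYears += 9
--
--         else:
--             catYears += 4
--             dogYears += 5
--
--     list_of_ages.append(catYears)
--     list_of_ages.append(dogYears)
--
--     return list_of_ages
-- ===== SOURCE B (Python) =====
-- def calculate(years: int) -> list:
--     # Closed-form O(1) replacement for the year-by-year loop.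
--     if years <= 0:
--         return [years, 0, 0]
--     if years == 1:
--         return [years, 15, 15]
--     return [years, 4 * years + 16, 5 * years + 14]
-- ===== Notes on version B (the rewrite author's own statement) =====
-- stated objective: faster
-- what changed: Replaced the per-year accumulation loop with a closed-form arithmetic formula (one branch per age regime of the growth rule).
import Mathlib
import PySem

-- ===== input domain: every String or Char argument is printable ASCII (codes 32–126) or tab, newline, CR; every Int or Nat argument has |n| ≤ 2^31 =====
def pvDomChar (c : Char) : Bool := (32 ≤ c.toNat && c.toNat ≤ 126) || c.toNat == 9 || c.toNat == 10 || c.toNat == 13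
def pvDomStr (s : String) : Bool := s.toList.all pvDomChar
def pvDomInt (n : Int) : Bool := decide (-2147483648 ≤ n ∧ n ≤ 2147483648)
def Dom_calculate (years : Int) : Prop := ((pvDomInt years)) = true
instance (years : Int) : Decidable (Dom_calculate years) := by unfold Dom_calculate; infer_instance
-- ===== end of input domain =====

-- B replaces A's per-year loop with a closed-form formula (O(1) instead of O(n)).

-- ===== PORT A =====
-- loop body of 'for year in range(years)': updates the (catYears, dogYears) pair
def calcStep (cd : Int × Int) (year : Int) : Int × Int :=
  if year = 0 then (cd.1 + 15, cd.2 + 15)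
  else if year = 1 then (cd.1 + 9, cd.2 + 9)
  else (cd.1 + 4, cd.2 + 5)

def calculate (years : Int) : List Int :=
  let cd := (PySem.List.pyRange 0 years 1).foldl calcStep (0, 0)
  [years] ++ [cd.1] ++ [cd.2]

-- ===== PORT B =====
def calculate_alt (years : Int) : List Int :=
  if years ≤ 0 then [years, 0, 0]
  else if years = 1 then [years, 15, 15]
  else [years, 4 * years + 16, 5 * years + 14]

-- ===== PRECONDITION & SPEC =====
def Spec_calculate (years : Int) (out : List Int) : Prop := out = calculate_alt years
instance (years : Int) (out : List Int) : Decidable (Spec_calculate years out) := by unfold Spec_calculate; infer_instance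

-- ===== CLAIM (what is proved, stated in full; the proofs are below) =====
def Claim_equal_calculate : Prop := ∀ (years : Int), Dom_calculate years → Spec_calculate years (calculate years)

-- ===== LEMMAS AND PROOFS =====

-- the tail of the loop (years 2,3,…) adds 4 resp. 5 per year
theorem calcStep_tail (n : ℕ) (c d : Int) :
    (PySem.List.pyRange 2 (2 + n) 1).foldl calcStep (c, d) = (c + 4 * n, d + 5 * n) := by
  induction n generalizing c d with
  | zero => simp
  | succ k ih =>
    have h : (2 : Int) ≤ 2 + (k : Int) := by omega
    have : (2 : Int) + ((k : ℕ) + 1 : ℕ) = (2 + (k : Int)) + 1 := by push_cast; ring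
    rw [this, PySem.List.pyRange_one_succ_right h, List.foldl_append, ih]
    simp only [List.foldl, calcStep]
    have h0 : ¬ ((2 : Int) + k = 0) := by omega
    have h1 : ¬ ((2 : Int) + k = 1) := by omega
    rw [if_neg h0, if_neg h1]
    refine Prod.ext ?_ ?_ <;> (simp; ring)

-- ===== VERDICT (by name: the statement is the Claim_ definition above) =====
theorem calculate_spec : Claim_equal_calculate := by
  intro years _
  unfold Spec_calculate calculate calculate_alt
  by_cases h0 : years ≤ 0
  · rw [if_pos h0, PySem.List.pyRange_one_eq_nil h0]
    simp
  · rw [if_neg h0]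
    by_cases h1 : years = 1
    · subst h1
      rw [if_pos rfl]
      norm_num [PySem.List.pyRange, calcStep]
    · rw [if_neg h1]
      have h2 : (2 : Int) ≤ years := by omega
      rw [PySem.List.pyRange_one_cons (by omega : (0:Int) < years),
          show (0:Int)+1 = 1 by norm_num,
          PySem.List.pyRange_one_cons (by omega : (1:Int) < years)]
      simp only [List.foldl_cons, calcStep]
      norm_num
      obtain ⟨n, hn⟩ : ∃ n : ℕ, years = 2 + (n : Int) :=
        ⟨(years - 2).toNat, by omega⟩
      subst hn
      rw [calcStep_tail]
      refine ⟨by push_cast; ring, by push_cast; ring⟩
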